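-- pv_equiv track=rewrite | github.com/ZhaiLab-SUSTech/Full_length_transcripts_analysis | nanopore_cdna/script/extract_read_exon_pos.py | get_introns
-- ===== SOURCE A (Python) =====
-- def get_introns(blocks):
--     introns = []
--     if len(blocks) > 1:
--         last_start = blocks[0][1] + 1
--         for start, end in blocks[1:]:
--             introns.append([last_start, start-1])
--             last_start = end + 1
--     return introns
-- ===== SOURCE B (Python) =====
-- def _pair_up(xs):
--     if len(xs) < 2:
--         return []
--     return [[xs[0] + 1, xs[1] - 1]] + _pair_up(xs[2:])
--
--
-- def get_introns(blocks):
--     # Flatten the blocks into one coordinate list s0,e0,s1,e1,...,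
--     # strip the outermost two coordinates, and pair up the interior
--     # boundary coordinates: each adjacent pair (e_i, s_{i+1}) is an intron.
--     coords = [c for block in blocks for c in block]
--     return _pair_up(coords[1:-1])
-- ===== Notes on version B (the rewrite author's own statement) =====
-- stated objective: alternative
-- what changed: Instead of walking the block list with a carried last_start accumulator, B flattens all blocks into one coordinate list, strips the two outermost coordinates, and recursively chunks the interior coordinates two at a time into introns.
import Mathlib
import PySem

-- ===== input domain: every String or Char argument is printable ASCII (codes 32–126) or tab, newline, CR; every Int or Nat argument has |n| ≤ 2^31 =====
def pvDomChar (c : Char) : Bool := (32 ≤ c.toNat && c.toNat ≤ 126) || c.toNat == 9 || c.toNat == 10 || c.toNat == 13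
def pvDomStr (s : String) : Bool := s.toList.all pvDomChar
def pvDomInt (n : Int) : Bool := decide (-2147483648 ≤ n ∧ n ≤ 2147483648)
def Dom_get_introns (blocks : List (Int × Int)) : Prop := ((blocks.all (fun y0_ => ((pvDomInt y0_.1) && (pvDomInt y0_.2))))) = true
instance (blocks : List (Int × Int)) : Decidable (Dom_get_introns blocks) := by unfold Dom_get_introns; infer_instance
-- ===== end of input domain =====

-- B replaces A's accumulator walk over the block list by flatten → strip the two
-- outermost coordinates → chunk the interior coordinates pairwise (objective: alternative).

-- ===== PORT A =====
-- A's loop over blocks[1:] carrying (introns, last_start) as state, transliterated as a foldl.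
def get_introns (blocks : List (Int × Int)) : List (List Int) :=
  if blocks.length > 1 then
    match blocks with
    | [] => []
    | b0 :: rest =>
      (rest.foldl (fun st p => (st.1 ++ [[st.2, p.1 - 1]], p.2 + 1)) ([], b0.2 + 1)).1
  else []

-- ===== PORT B =====
-- B's recursive helper _pair_up: stop when fewer than two elements remain,
-- else emit [xs[0]+1, xs[1]-1] and recurse on xs[2:].
def pairUp : List Int → List (List Int)
  | a :: b :: t => [a + 1, b - 1] :: pairUp t
  | _ => []

-- B: flatten blocks into the coordinate list, take coords[1:-1], pair up.
def get_introns_alt (blocks : List (Int × Int)) : List (List Int) :=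
  pairUp (PySem.List.slice (blocks.flatMap (fun b => [b.1, b.2])) (some 1) (some (-1)))

-- ===== PRECONDITION & SPEC =====
def Spec_get_introns (blocks : List (Int × Int)) (out : List (List Int)) : Prop := out = get_introns_alt blocks
instance (blocks : List (Int × Int)) (out : List (List Int)) : Decidable (Spec_get_introns blocks out) := by unfold Spec_get_introns; infer_instance

-- ===== CLAIM (what is proved, stated in full; the proofs are below) =====
def Claim_equal_get_introns : Prop := ∀ (blocks : List (Int × Int)), Dom_get_introns blocks → Spec_get_introns blocks (get_introns blocks)

-- ===== LEMMAS AND PROOFS =====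

-- the state-free reading of A's loop
def gIntrons : Int → List (Int × Int) → List (List Int)
  | _, [] => []
  | last, (s, e) :: t => [last, s - 1] :: gIntrons (e + 1) t

theorem foldl_eq_gIntrons (rest : List (Int × Int)) (acc : List (List Int)) (last : Int) :
    (rest.foldl (fun st p => (st.1 ++ [[st.2, p.1 - 1]], p.2 + 1)) (acc, last)).1
      = acc ++ gIntrons last rest := by
  induction rest generalizing acc last with
  | nil => simp [gIntrons]
  | cons p t ih =>
    obtain ⟨s, e⟩ := p
    simp [List.foldl, gIntrons, ih, List.append_assoc]

-- xs[1:-1] is tail-then-dropLast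
theorem slice_one_neg_one (xs : List Int) :
    PySem.List.slice xs (some 1) (some (-1)) = xs.tail.dropLast := by
  cases xs with
  | nil => simp [PySem.List.slice, PySem.List.clampIdx]
  | cons a t =>
    simp [PySem.List.slice, PySem.List.clampIdx]
    cases t with
    | nil => simp
    | cons b u =>
      simp [List.dropLast_eq_take]
      rw [if_neg (by omega)]
      omega

-- pairing the interior coordinates reproduces A's intron list
theorem pairUp_dropLast (rest : List (Int × Int)) (e : Int) :
    pairUp ((e :: rest.flatMap (fun b => [b.1, b.2])).dropLast) = gIntrons (e + 1) rest := by
  induction rest generalizing e with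
  | nil => simp [pairUp, gIntrons]
  | cons p t ih =>
    obtain ⟨s, e'⟩ := p
    simp only [List.flatMap_cons, List.cons_append, List.nil_append, List.dropLast_cons₂]
    simp [pairUp, gIntrons, ih]

-- ===== VERDICT (by name: the statement is the Claim_ definition above) =====
theorem get_introns_spec : Claim_equal_get_introns := by
  intro blocks _
  unfold Spec_get_introns get_introns get_introns_alt
  rw [slice_one_neg_one]
  match blocks with
  | [] => simp [pairUp]
  | [b0] => simp [pairUp]
  | b0 :: p :: t =>
    simp only [List.length, List.tail, List.flatMap_cons, List.cons_append]
    rw [if_pos (by omega)]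
    rw [foldl_eq_gIntrons]
    rw [← pairUp_dropLast (p :: t) b0.2]
    simp
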